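-- pv_equiv track=rewrite | github.com/jansvobodaa/nurikabe.py | # obecne.py | find_moveable_cells
-- ===== SOURCE A (Python) =====
-- def find_moveable_cells(islands, starting_cells):
--     moveable_cells = []
--     def dfs(remaining_island, start, visited):
--         directions = [(0, 1), (1, 0), (0, -1), (-1, 0)]
--         stack = [start]
--         while stack:
--             cell = stack.pop()
--             if cell not in visited:
--                 visited.add(cell)
--                 for dx, dy in directions:
--                     next_cell = (cell[0] + dx, cell[1] + dy)
--                     if next_cell in remaining_island and next_cell not in visited:
--                         stack.append(next_cell)
--     for island in islands:
--         for cell in island: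
--             if cell in starting_cells:
--                 continue
--             remaining_island = set(island) - {cell}
--             if not remaining_island:
--                 continue
--             visited = set()
--             dfs(remaining_island, next(iter(remaining_island)), visited)
--             if len(visited) == len(remaining_island):
--                 moveable_cells.append(cell)
--     return moveable_cells
-- ===== SOURCE B (Python) =====
-- def _single_component(cells):
--     # union-find by relabeling: every cell starts as its own component label;
--     # each right/down adjacency between two cells merges their two labels.
--     # No search/traversal: connectivity is decided by edge-driven merging.
--     label = {c: c for c in cells}
--     for c in cells:
--         for n in ((c[0], c[1] + 1), (c[0] + 1, c[1])):
--             if n in label: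
--                 la, lb = label[c], label[n]
--                 if la != lb:
--                     label = {k: (la if v == lb else v) for k, v in label.items()}
--     first = next(iter(label.values()))
--     return all(v == first for v in label.values())
--
--
-- def find_moveable_cells(islands, starting_cells):
--     starts = set(starting_cells)
--     moveable_cells = []
--     for island in islands:
--         cells = set(island)
--         for cell in island:
--             if cell in starts:
--                 continue
--             remaining = cells - {cell}
--             if remaining and _single_component(remaining):
--                 moveable_cells.append(cell)
--     return moveable_cells
-- ===== Notes on version B (the rewrite author's own statement) =====
-- stated objective: alternative
-- what changed: Connectivity of the island minus a cell is decided by union-find-style component merging (each cell starts as its own label, every right/down adjacency edge merges two labels by relabeling, verdict = all labels equal) instead of A's per-cell DFS flood fill with a stack and visited set.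
import Mathlib
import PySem

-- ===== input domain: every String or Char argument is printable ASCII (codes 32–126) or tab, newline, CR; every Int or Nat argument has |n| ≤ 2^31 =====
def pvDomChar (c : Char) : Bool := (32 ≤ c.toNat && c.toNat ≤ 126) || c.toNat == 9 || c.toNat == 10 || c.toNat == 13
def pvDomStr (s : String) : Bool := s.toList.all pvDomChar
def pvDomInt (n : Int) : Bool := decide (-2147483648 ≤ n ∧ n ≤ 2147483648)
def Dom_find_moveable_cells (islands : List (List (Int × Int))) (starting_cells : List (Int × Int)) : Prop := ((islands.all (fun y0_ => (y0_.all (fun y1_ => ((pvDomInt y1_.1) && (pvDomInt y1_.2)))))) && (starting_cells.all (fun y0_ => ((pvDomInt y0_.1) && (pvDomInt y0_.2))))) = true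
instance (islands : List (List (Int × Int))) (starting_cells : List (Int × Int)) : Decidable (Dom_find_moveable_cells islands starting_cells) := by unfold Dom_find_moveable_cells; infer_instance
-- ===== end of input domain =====

-- B decides connectivity of an island minus a cell by union-find-style component merging (every
-- cell its own label, each right/down adjacency edge merges two labels by relabeling; verdict =
-- all labels equal) instead of A's per-cell stack-DFS flood fill (objective: alternative algorithm).
-- Both ports traverse sets in PySem.Set's first-insertion order where Python iterates a set
-- (A's `next(iter(...))` start cell, B's dict built over a set): the connectivity verdict each
-- loop produces is order-independent, so each port returns what its Python returns.

-- termination helper cited by port A's decreasing_by (a strict filter-length lemma)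
theorem pv_filter_length_lt {α : Type} (l : List α) (p q : α → Bool)
    (himp : ∀ a, q a = true → p a = true) (x : α) (hx : x ∈ l)
    (hpx : p x = true) (hqx : q x = false) :
    (l.filter q).length < (l.filter p).length := by
  induction l with
  | nil => cases hx
  | cons a t ih =>
    have hmono : (t.filter q).length ≤ (t.filter p).length := by
      rw [← List.countP_eq_length_filter, ← List.countP_eq_length_filter]
      exact List.countP_mono_left (fun b _ hb => himp b hb)
    by_cases hax : a = x
    · subst hax
      simp only [List.filter_cons, hpx, hqx]
      simpa using Nat.lt_succ_of_le hmono
    · have hx' : x ∈ t := by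
        rcases List.mem_cons.1 hx with h | h
        · exact absurd h.symm hax
        · exact h
      have hlt := ih hx'
      simp only [List.filter_cons]
      cases hqa : q a with
      | true => simp [himp a hqa]; omega
      | false => cases hpa : p a <;> simp <;> omega

-- ===== PORT A =====
def pvDirections : List (Int × Int) := [(0, 1), (1, 0), (0, -1), (-1, 0)]

-- Python's `stack.pop()` pops the LAST element; the stack is represented top-first here, so the
-- four appends of one visit become a reversed block consed on the front (same LIFO discipline).
-- The hypothesis argument `hst` only justifies termination (every stacked cell lies in
-- `remaining`, which Python guarantees because pushes are guarded by `next_cell in remaining_island`).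
def pvDfsA (remaining : PySem.Set (Int × Int)) (stack : List (Int × Int))
    (visited : PySem.Set (Int × Int)) (hst : ∀ x ∈ stack, x ∈ remaining) :
    PySem.Set (Int × Int) :=
  match stack with
  | [] => visited
  | cell :: rest =>
    if hv : PySem.Set.contains visited cell then
      pvDfsA remaining rest visited (fun x hx => hst x (List.mem_cons_of_mem _ hx))
    else
      let visited' := PySem.Set.add visited cell
      let pushes := (pvDirections.map (fun d => (cell.1 + d.1, cell.2 + d.2))).filter
          (fun n => PySem.Set.contains remaining n && !PySem.Set.contains visited' n)
      pvDfsA remaining (pushes.reverse ++ rest) visited'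
        (fun x hx => by
          rcases List.mem_append.1 hx with h | h
          · have hf := List.of_mem_filter (List.mem_reverse.1 h)
            simp only [Bool.and_eq_true] at hf
            exact (PySem.Set.contains_iff _ _).1 hf.1
          · exact hst x (List.mem_cons_of_mem _ h))
termination_by 5 * (List.filter (fun x => !PySem.Set.contains visited x) remaining).length + stack.length
decreasing_by
  · simp only [List.length_cons]; omega
  · have hcell : cell ∈ remaining := hst cell List.mem_cons_self
    have hlen : (List.filter (fun n => PySem.Set.contains remaining n && !PySem.Set.contains (PySem.Set.add visited cell) n)
        (List.map (fun d => (cell.1 + d.1, cell.2 + d.2)) pvDirections)).length ≤ 4 := by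
      have := List.length_filter_le
        (fun n => PySem.Set.contains remaining n && !PySem.Set.contains (PySem.Set.add visited cell) n)
        (List.map (fun d => (cell.1 + d.1, cell.2 + d.2)) pvDirections)
      simpa [pvDirections] using this
    have hstrict : (List.filter (fun x => !PySem.Set.contains (PySem.Set.add visited cell) x) remaining).length
        < (List.filter (fun x => !PySem.Set.contains visited x) remaining).length := by
      apply pv_filter_length_lt remaining _ _ _ cell hcell
      · simp only [Bool.not_eq_true] at hv
        simpa using hv
      · have hc : cell ∈ PySem.Set.add visited cell := by simp [PySem.Set.mem_add]
        simp [PySem.Set.contains_eq_listContains, hc]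
      · intro a ha
        simp only [Bool.not_eq_true'] at ha ⊢
        have hmem : a ∉ PySem.Set.add visited cell := by
          simpa [PySem.Set.contains_eq_listContains, List.contains_iff_mem] using ha
        have : a ∉ visited := fun hmm => hmem (by simp [PySem.Set.mem_add, hmm])
        simpa [PySem.Set.contains_eq_listContains, List.contains_iff_mem] using this
    simp only [List.length_append, List.length_reverse, List.length_cons]
    omega

def pvCheckCell (island : List (Int × Int)) (cell : Int × Int) : Bool :=
  -- remaining_island = set(island) - {cell}
  let remaining : PySem.Set (Int × Int) := PySem.Set.diff (PySem.Set.ofList island) [cell]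
  match remaining with
  | [] => false     -- `if not remaining_island: continue`
  | s :: rest =>    -- start = next(iter(remaining_island)) : the connectivity verdict is start-independent
    (pvDfsA (s :: rest) [s] (PySem.Set.empty) (fun x hx => by
        simp only [List.mem_singleton] at hx
        subst hx; exact List.mem_cons_self)).length == (s :: rest).length

def find_moveable_cells (islands : List (List (Int × Int))) (starting_cells : List (Int × Int)) : List (Int × Int) :=
  islands.foldl (fun moveable island =>
    island.foldl (fun moveable cell =>
      if starting_cells.contains cell then moveable
      else if pvCheckCell island cell then moveable ++ [cell] else moveable) moveable) []

-- ===== PORT B =====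
def pvNbrs2 (c : Int × Int) : List (Int × Int) := [(c.1, c.2 + 1), (c.1 + 1, c.2)]

-- the dict comprehension {k: (la if v == lb else v) for k, v in label.items()}
def pvRelabel (L : PySem.Dict (Int × Int) (Int × Int)) (la lb : Int × Int) :
    PySem.Dict (Int × Int) (Int × Int) :=
  L.items.foldl (fun d kv => d.insert kv.1 (if kv.2 == lb then la else kv.2)) PySem.Dict.empty

-- loop body of `for n in ((c[0], c[1] + 1), (c[0] + 1, c[1])): if n in label: ...`
def pvMerge (L : PySem.Dict (Int × Int) (Int × Int)) (c n : Int × Int) :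
    PySem.Dict (Int × Int) (Int × Int) :=
  if L.contains n then
    let la := L.getD c c   -- label[c]: c is always a key, the default is never read
    let lb := L.getD n n   -- label[n]: guarded by `n in label`
    if la != lb then pvRelabel L la lb else L
  else L

def pvSingleComponent (cells : List (Int × Int)) : Bool :=
  let label0 := cells.foldl (fun d c => d.insert c c) PySem.Dict.empty
  let label := cells.foldl (fun L c => (pvNbrs2 c).foldl (fun L n => pvMerge L c n) L) label0
  match label.values with
  | [] => false   -- dead branch: _single_component is only applied to a nonempty set
  | v :: vs => (v :: vs).all (fun w => w == v)   -- first = next(iter(values())); all(v == first ...)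

def find_moveable_cells_alt (islands : List (List (Int × Int))) (starting_cells : List (Int × Int)) : List (Int × Int) :=
  let starts := PySem.Set.ofList starting_cells
  islands.foldl (fun moveable island =>
    let cells := PySem.Set.ofList island
    island.foldl (fun moveable cell =>
      if PySem.Set.contains starts cell then moveable
      else
        let remaining := PySem.Set.diff cells [cell]
        if !remaining.isEmpty && pvSingleComponent remaining then moveable ++ [cell]
        else moveable) moveable) []

-- ===== PRECONDITION & SPEC =====
def Spec_find_moveable_cells (islands : List (List (Int × Int))) (starting_cells : List (Int × Int)) (out : List (Int × Int)) : Prop := out = find_moveable_cells_alt islands starting_cells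
instance (islands : List (List (Int × Int))) (starting_cells : List (Int × Int)) (out : List (Int × Int)) : Decidable (Spec_find_moveable_cells islands starting_cells out) := by unfold Spec_find_moveable_cells; infer_instance

-- ===== CLAIM (what is proved, stated in full; the proofs are below) =====
def Claim_equal_find_moveable_cells : Prop := ∀ (islands : List (List (Int × Int))) (starting_cells : List (Int × Int)), Dom_find_moveable_cells islands starting_cells → Spec_find_moveable_cells islands starting_cells (find_moveable_cells islands starting_cells)

-- ===== LEMMAS AND PROOFS =====

-- 4-neighbourhood (A's directions in list order) and adjacency
def pvNbrs (c : Int × Int) : List (Int × Int) :=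
  [(c.1, c.2 + 1), (c.1 + 1, c.2), (c.1, c.2 - 1), (c.1 - 1, c.2)]

def pvAdj (x y : Int × Int) : Prop := y ∈ pvNbrs x

theorem pvMapDirs_eq (c : Int × Int) :
    pvDirections.map (fun d => (c.1 + d.1, c.2 + d.2)) = pvNbrs c := by
  simp [pvDirections, pvNbrs, Prod.ext_iff]
  omega

theorem pvAdj_symm {x y : Int × Int} (h : pvAdj x y) : pvAdj y x := by
  rcases x with ⟨a, b⟩; rcases y with ⟨u, v⟩
  simp only [pvAdj, pvNbrs, List.mem_cons, Prod.mk.injEq,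
    List.not_mem_nil, or_false] at h ⊢
  omega

theorem pvAdj_nbrs2 {x y : Int × Int} (h : pvAdj x y) :
    y ∈ pvNbrs2 x ∨ x ∈ pvNbrs2 y := by
  rcases x with ⟨a, b⟩; rcases y with ⟨u, v⟩
  simp only [pvAdj, pvNbrs, pvNbrs2, List.mem_cons, Prod.mk.injEq,
    List.not_mem_nil, or_false] at h ⊢
  omega

-- directed reachability inside a fixed cell list R
inductive pvReach (R : List (Int × Int)) (s : Int × Int) : Int × Int → Prop
  | base : pvReach R s s
  | step {x y : Int × Int} : pvReach R s x → y ∈ R → pvAdj x y → pvReach R s y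

theorem pvReach_mem {R : List (Int × Int)} {s x : Int × Int} (hs : s ∈ R)
    (h : pvReach R s x) : x ∈ R := by
  induction h with
  | base => exact hs
  | step _ hy _ => exact hy

theorem pvReach_trans {R : List (Int × Int)} {a b c : Int × Int}
    (h1 : pvReach R a b) (h2 : pvReach R b c) : pvReach R a c := by
  induction h2 with
  | base => exact h1
  | step _ hy hadj ih => exact pvReach.step ih hy hadj

theorem pvReach_symm {R : List (Int × Int)} {a x : Int × Int} (ha : a ∈ R)
    (h : pvReach R a x) : pvReach R x a := by
  induction h with
  | base => exact pvReach.base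
  | @step w y haw hy hadj ih =>
    have hw : w ∈ R := pvReach_mem ha haw
    exact pvReach_trans (pvReach.step pvReach.base hw (pvAdj_symm hadj)) ih

theorem pvClosed_reach {R V : List (Int × Int)} {s : Int × Int} (hsV : s ∈ V)
    (hclosed : ∀ x ∈ V, ∀ y ∈ R, pvAdj x y → y ∈ V) :
    ∀ x, pvReach R s x → x ∈ V := by
  intro x h
  induction h with
  | base => exact hsV
  | @step a y _ hy hadj ih => exact hclosed a ih y hy hadj

-- equivalence closure of adjacency restricted to R
def pvAdjConn (R : List (Int × Int)) (x y : Int × Int) : Prop :=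
  Relation.EqvGen (fun a b => a ∈ R ∧ b ∈ R ∧ pvAdj a b) x y

theorem pvReach_iff_adjConn {R : List (Int × Int)} {s x : Int × Int} (hs : s ∈ R) :
    pvReach R s x ↔ pvAdjConn R s x := by
  constructor
  · intro h
    induction h with
    | base => exact Relation.EqvGen.refl s
    | @step w y hw hy hadj ih =>
      exact Relation.EqvGen.trans _ _ _ ih
        (Relation.EqvGen.rel _ _ ⟨pvReach_mem hs hw, hy, hadj⟩)
  · intro h
    have main : ∀ a b : Int × Int, pvAdjConn R a b →
        pvReach R a b ∧ (a = b ∨ (a ∈ R ∧ b ∈ R)) := by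
      intro a b h
      induction h with
      | rel a b hab => exact ⟨pvReach.step pvReach.base hab.2.1 hab.2.2,
          Or.inr ⟨hab.1, hab.2.1⟩⟩
      | refl a => exact ⟨pvReach.base, Or.inl rfl⟩
      | symm a b _ ih =>
        rcases ih.2 with rfl | ⟨haR, hbR⟩
        · exact ⟨pvReach.base, Or.inl rfl⟩
        · exact ⟨pvReach_symm haR ih.1, Or.inr ⟨hbR, haR⟩⟩
      | trans a b c _ _ ih1 ih2 =>
        refine ⟨pvReach_trans ih1.1 ih2.1, ?_⟩
        rcases ih1.2 with rfl | ⟨haR, hbR⟩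
        · exact ih2.2
        · rcases ih2.2 with rfl | ⟨_, hcR⟩
          · exact Or.inr ⟨haR, hbR⟩
          · exact Or.inr ⟨haR, hcR⟩
    exact (main s x h).1

-- ---- the B-side label dict: items stay `R.map (fun k => (k, f k))` for a semantic label map f ----

def pvItemsEq (R : List (Int × Int)) (L : PySem.Dict (Int × Int) (Int × Int))
    (f : Int × Int → Int × Int) : Prop :=
  L.items = R.map (fun k => (k, f k))

-- invariant: label-equality is exactly connectivity via some edge list of adjacencies inside R
def pvInv (R : List (Int × Int)) (f : Int × Int → Int × Int) : Prop :=
  ∃ E : List ((Int × Int) × (Int × Int)),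
    (∀ a b : Int × Int, (a, b) ∈ E → a ∈ R ∧ b ∈ R ∧ pvAdj a b) ∧
    (∀ x y : Int × Int, Relation.EqvGen (fun a b => (a, b) ∈ E) x y ↔
      (x = y ∨ (x ∈ R ∧ y ∈ R ∧ f x = f y)))

theorem pvBuild_items (ps : List ((Int × Int) × (Int × Int)))
    (g : (Int × Int) × (Int × Int) → Int × Int) :
    ∀ (d : PySem.Dict (Int × Int) (Int × Int)), (ps.map Prod.fst).Nodup →
    (∀ p ∈ ps, d.contains p.1 = false) →
    (ps.foldl (fun d kv => d.insert kv.1 (g kv)) d).items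
      = d.items ++ ps.map (fun kv => (kv.1, g kv)) := by
  induction ps with
  | nil => intro d _ _; simp
  | cons p t ih =>
    intro d hnd hfree
    simp only [List.map_cons, List.nodup_cons] at hnd
    simp only [List.foldl_cons]
    rw [ih (d.insert p.1 (g p)) hnd.2 ?side]
    · rw [PySem.Dict.items_insert_of_not_contains d (g p) (hfree p List.mem_cons_self)]
      simp
    case side =>
      intro q hq
      rw [PySem.Dict.contains_insert]
      have hne : q.1 ≠ p.1 := by
        intro he
        exact hnd.1 (he ▸ List.mem_map_of_mem hq)
      simp [hne, hfree q (List.mem_cons_of_mem _ hq)]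

theorem pvItemsEq_getD {R : List (Int × Int)} {L : PySem.Dict (Int × Int) (Int × Int)}
    {f : Int × Int → Int × Int} (h : pvItemsEq R L f) {x : Int × Int} (hx : x ∈ R)
    (d : Int × Int) : L.getD x d = f x := by
  have hfind : L.items.find? (fun p => p.1 == x) = some (x, f x) := by
    rw [h, List.find?_map]
    have h1 : (List.find? ((fun p => p.1 == x) ∘ fun k => (k, f k)) R).isSome :=
      List.find?_isSome.2 ⟨x, hx, by simp⟩
    obtain ⟨y, hy⟩ := Option.isSome_iff_exists.1 h1
    have hyx : y = x := by simpa using List.find?_some hy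
    subst hyx
    simp [hy]
  simp [PySem.Dict.getD, PySem.Dict.get?, hfind]

theorem pvItemsEq_contains {R : List (Int × Int)} {L : PySem.Dict (Int × Int) (Int × Int)}
    {f : Int × Int → Int × Int} (h : pvItemsEq R L f) (y : Int × Int) :
    L.contains y = decide (y ∈ R) := by
  show L.items.any (fun p => p.1 == y) = decide (y ∈ R)
  rw [h, List.any_map]
  rw [Bool.eq_iff_iff]
  simp [Function.comp]

theorem pvItemsEq_values {R : List (Int × Int)} {L : PySem.Dict (Int × Int) (Int × Int)}
    {f : Int × Int → Int × Int} (h : pvItemsEq R L f) :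
    L.values = R.map f := by
  show L.items.map (fun p => p.2) = R.map f
  rw [h, List.map_map]
  rfl

theorem pvRelabel_items {R : List (Int × Int)} {L : PySem.Dict (Int × Int) (Int × Int)}
    {f : Int × Int → Int × Int} (hnd : R.Nodup) (h : pvItemsEq R L f) (la lb : Int × Int) :
    pvItemsEq R (pvRelabel L la lb) (fun k => if f k = lb then la else f k) := by
  unfold pvRelabel pvItemsEq
  rw [h]
  rw [pvBuild_items _ _ PySem.Dict.empty
    (by
      rw [List.map_map, show (Prod.fst ∘ fun k => ((k, f k) : (Int × Int) × (Int × Int))) = id from funext (fun k => rfl)]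
      simpa using hnd)
    (fun p _ => PySem.Dict.contains_empty _)]
  rw [List.map_map]
  show PySem.Dict.empty.items ++ _ = _
  rw [show PySem.Dict.empty.items = ([] : List ((Int × Int) × (Int × Int))) from rfl, List.nil_append]
  apply List.map_congr_left
  intro k _
  simp [Function.comp]

theorem pvNbrs2_subset_nbrs (c : Int × Int) : ∀ n ∈ pvNbrs2 c, pvAdj c n := by
  intro n hn
  simp only [pvNbrs2, List.mem_cons, List.not_mem_nil, or_false] at hn
  rcases hn with rfl | rfl <;> simp [pvAdj, pvNbrs]

-- one inner-loop step preserves the invariant and merges the touched edge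
theorem pvMerge_spec {R : List (Int × Int)} (hnd : R.Nodup)
    {L : PySem.Dict (Int × Int) (Int × Int)} {f : Int × Int → Int × Int}
    (hL : pvItemsEq R L f) (hInv : pvInv R f) {c n : Int × Int} (hc : c ∈ R)
    (hadj : pvAdj c n) :
    ∃ f', pvItemsEq R (pvMerge L c n) f' ∧ pvInv R f' ∧
      (∀ x y, f x = f y → f' x = f' y) ∧ (n ∈ R → f' c = f' n) := by
  unfold pvMerge
  rw [pvItemsEq_contains hL n]
  by_cases hn : n ∈ R
  · simp only [hn, decide_true, if_true]
    rw [pvItemsEq_getD hL hc, pvItemsEq_getD hL hn]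
    by_cases heq : f c = f n
    · simp only [heq, bne_self_eq_false, Bool.false_eq_true, if_false]
      exact ⟨f, hL, hInv, fun x y h => h, fun _ => heq⟩
    · have hbne : (f c != f n) = true := by simpa using heq
      simp only [hbne, if_true]
      refine ⟨fun k => if f k = f n then f c else f k,
        pvRelabel_items hnd hL (f c) (f n), ?_, ?_, ?_⟩
      · obtain ⟨E, hvalid, hiff⟩ := hInv
        refine ⟨E ++ [(c, n)], ?_, ?_⟩
        · intro a b hab
          rcases List.mem_append.1 hab with h | h
          · exact hvalid a b h
          · simp only [List.mem_singleton, Prod.mk.injEq] at h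
            exact h.1 ▸ h.2 ▸ ⟨hc, hn, hadj⟩
        · intro x y
          constructor
          · intro h
            induction h with
            | rel a b hab =>
              rcases List.mem_append.1 hab with h | h
              · rcases (hiff a b).1 (Relation.EqvGen.rel _ _ h) with rfl | ⟨haR, hbR, hf⟩
                · exact Or.inl rfl
                · exact Or.inr ⟨haR, hbR, by simp [hf]⟩
              · simp only [List.mem_singleton, Prod.mk.injEq] at h
                obtain ⟨h1, h2⟩ := h
                subst h1; subst h2
                exact Or.inr ⟨hc, hn, by simp [heq]⟩
            | refl a => exact Or.inl rfl
            | symm a b _ ih =>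
              rcases ih with rfl | ⟨haR, hbR, hf⟩
              · exact Or.inl rfl
              · exact Or.inr ⟨hbR, haR, hf.symm⟩
            | trans a b d _ _ ih1 ih2 =>
              rcases ih1 with rfl | ⟨haR, hbR, hf1⟩
              · exact ih2
              · rcases ih2 with rfl | ⟨_, hdR, hf2⟩
                · exact Or.inr ⟨haR, hbR, hf1⟩
                · exact Or.inr ⟨haR, hdR, hf1.trans hf2⟩
          · have hmono : ∀ a b : Int × Int,
                Relation.EqvGen (fun a b => (a, b) ∈ E) a b →
                Relation.EqvGen (fun a b => (a, b) ∈ E ++ [(c, n)]) a b :=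
              fun a b h => Relation.EqvGen.mono
                (fun a b hab => List.mem_append_left _ hab) h
            have hnew : Relation.EqvGen (fun a b => (a, b) ∈ E ++ [(c, n)]) c n :=
              Relation.EqvGen.rel _ _ (List.mem_append_right _ List.mem_cons_self)
            rintro (rfl | ⟨hxR, hyR, hfxy⟩)
            · exact Relation.EqvGen.refl x
            · by_cases hx1 : f x = f n <;> by_cases hy1 : f y = f n
              · exact hmono _ _ ((hiff x y).2
                  (Or.inr ⟨hxR, hyR, hx1.trans hy1.symm⟩))
              · simp only [hx1, if_true, hy1, if_false] at hfxy
                exact Relation.EqvGen.trans _ _ _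
                  (hmono _ _ ((hiff x n).2 (Or.inr ⟨hxR, hn, hx1⟩)))
                  (Relation.EqvGen.trans _ _ _ (Relation.EqvGen.symm _ _ hnew)
                    (hmono _ _ ((hiff c y).2 (Or.inr ⟨hc, hyR, hfxy⟩))))
              · simp only [hx1, if_false, hy1, if_true] at hfxy
                exact Relation.EqvGen.trans _ _ _
                  (hmono _ _ ((hiff x c).2 (Or.inr ⟨hxR, hc, hfxy⟩)))
                  (Relation.EqvGen.trans _ _ _ hnew
                    (hmono _ _ ((hiff n y).2 (Or.inr ⟨hn, hyR, hy1.symm⟩))))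
              · simp only [hx1, if_false, hy1, if_false] at hfxy
                exact hmono _ _ ((hiff x y).2 (Or.inr ⟨hxR, hyR, hfxy⟩))
      · intro x y h
        simp only [h]
      · intro _
        simp [heq]
  · simp only [hn, decide_false, Bool.false_eq_true, if_false]
    exact ⟨f, hL, hInv, fun x y h => h, fun h => h.elim⟩

theorem pvFold_spec {R : List (Int × Int)} (hnd : R.Nodup) :
    ∀ (todo : List (Int × Int)), (∀ c ∈ todo, c ∈ R) →
    ∀ (L : PySem.Dict (Int × Int) (Int × Int)) (f : Int × Int → Int × Int),
      pvItemsEq R L f → pvInv R f →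
    ∃ f', pvItemsEq R (todo.foldl (fun L c => (pvNbrs2 c).foldl (fun L n => pvMerge L c n) L) L) f' ∧
      pvInv R f' ∧ (∀ x y, f x = f y → f' x = f' y) ∧
      (∀ c ∈ todo, ∀ n ∈ pvNbrs2 c, n ∈ R → f' c = f' n) := by
  intro todo
  induction todo with
  | nil =>
    intro _ L f hL hInv
    exact ⟨f, hL, hInv, fun _ _ h => h, by simp⟩
  | cons c t ih =>
    intro hsub L f hL hInv
    have hc : c ∈ R := hsub c List.mem_cons_self
    have hn1 : (c.1, c.2 + 1) ∈ pvNbrs2 c := by simp [pvNbrs2]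
    have hn2 : (c.1 + 1, c.2) ∈ pvNbrs2 c := by simp [pvNbrs2]
    obtain ⟨f1, hL1, hInv1, hm1, hcov1⟩ :=
      pvMerge_spec (n := (c.1, c.2 + 1)) hnd hL hInv hc (pvNbrs2_subset_nbrs c _ hn1)
    obtain ⟨f2, hL2, hInv2, hm2, hcov2⟩ :=
      pvMerge_spec (n := (c.1 + 1, c.2)) hnd hL1 hInv1 hc (pvNbrs2_subset_nbrs c _ hn2)
    obtain ⟨f', hL', hInv', hm', hcov'⟩ :=
      ih (fun x hx => hsub x (List.mem_cons_of_mem _ hx)) _ f2 hL2 hInv2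
    have hshape : (c :: t).foldl (fun L c => (pvNbrs2 c).foldl (fun L n => pvMerge L c n) L) L
        = t.foldl (fun L c => (pvNbrs2 c).foldl (fun L n => pvMerge L c n) L)
            (pvMerge (pvMerge L c (c.1, c.2 + 1)) c (c.1 + 1, c.2)) := by
      simp [pvNbrs2]
    refine ⟨f', by rw [hshape]; exact hL', hInv',
      fun x y h => hm' _ _ (hm2 _ _ (hm1 _ _ h)), ?_⟩
    intro c' hc' n hn hnR
    rcases List.mem_cons.1 hc' with rfl | hc't
    · simp only [pvNbrs2, List.mem_cons, List.not_mem_nil, or_false] at hn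
      rcases hn with rfl | rfl
      · exact hm' _ _ (hm2 _ _ (hcov1 hnR))
      · exact hm' _ _ (hcov2 hnR)
    · exact hcov' c' hc't n hn hnR


-- final labels characterize connectivity: f x = f y ↔ pvAdjConn R x y  (x, y ∈ R)
theorem pvFinal_iff {R : List (Int × Int)} {f : Int × Int → Int × Int}
    (hInv : pvInv R f) (hcov : ∀ c ∈ R, ∀ n ∈ pvNbrs2 c, n ∈ R → f c = f n)
    {x y : Int × Int} (hx : x ∈ R) (hy : y ∈ R) :
    f x = f y ↔ pvAdjConn R x y := by
  obtain ⟨E, hvalid, hiff⟩ := hInv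
  constructor
  · intro hf
    exact Relation.EqvGen.mono (fun a b hab => hvalid a b hab)
      ((hiff x y).2 (Or.inr ⟨hx, hy, hf⟩))
  · intro h
    have main : ∀ a b : Int × Int, pvAdjConn R a b → f a = f b := by
      intro a b hab
      induction hab with
      | rel a b hab =>
        rcases pvAdj_nbrs2 hab.2.2 with h2 | h2
        · exact hcov a hab.1 b h2 hab.2.1
        · exact (hcov b hab.2.1 a h2 hab.1).symm
      | refl a => rfl
      | symm a b _ ih => exact ih.symm
      | trans a b d _ _ ih1 ih2 => exact ih1.trans ih2
    exact main x y h

-- B's single-component verdict: everything in R is label-connected to its head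
theorem pvSingleComponent_spec (s : Int × Int) (rest : List (Int × Int))
    (hnd : (s :: rest).Nodup) :
    pvSingleComponent (s :: rest) = true
      ↔ (∀ x ∈ s :: rest, pvReach (s :: rest) s x) := by
  have hL0 : pvItemsEq (s :: rest)
      ((s :: rest).foldl (fun d c => d.insert c c) PySem.Dict.empty) (fun k => k) := by
    have hmap : ((s :: rest).map (fun c => ((c, c) : (Int × Int) × (Int × Int)))).foldl
        (fun d kv => d.insert kv.1 kv.2) PySem.Dict.empty
        = (s :: rest).foldl (fun d c => d.insert c c) PySem.Dict.empty := by
      rw [List.foldl_map]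
    unfold pvItemsEq
    rw [← hmap, pvBuild_items _ (fun kv => kv.2) PySem.Dict.empty
      (by rw [List.map_map,
        show (Prod.fst ∘ fun c => ((c, c) : (Int × Int) × (Int × Int))) = id from funext (fun k => rfl)]
          simpa using hnd)
      (fun p _ => PySem.Dict.contains_empty _)]
    rw [show PySem.Dict.empty.items = ([] : List ((Int × Int) × (Int × Int))) from rfl,
      List.nil_append]
    simp [Function.comp]
  have hInv0 : pvInv (s :: rest) (fun k => k) := by
    refine ⟨[], fun a b hab => absurd hab (List.not_mem_nil), fun x y => ?_⟩
    constructor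
    · intro h
      induction h with
      | rel a b hab => exact absurd hab (List.not_mem_nil)
      | refl a => exact Or.inl rfl
      | symm a b _ ih =>
        rcases ih with rfl | ⟨h1, h2, h3⟩
        · exact Or.inl rfl
        · exact Or.inr ⟨h2, h1, h3.symm⟩
      | trans a b d _ _ ih1 ih2 =>
        rcases ih1 with rfl | ⟨h1, h2, h3⟩
        · exact ih2
        · rcases ih2 with rfl | ⟨h4, h5, h6⟩
          · exact Or.inr ⟨h1, h2, h3⟩
          · exact Or.inr ⟨h1, h5, h3.trans h6⟩
    · rintro (rfl | ⟨_, _, rfl⟩) <;> exact Relation.EqvGen.refl _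
  obtain ⟨f', hL', hInv', _, hcov'⟩ :=
    pvFold_spec hnd (s :: rest) (fun c hc => hc) _ _ hL0 hInv0
  have hs : s ∈ s :: rest := List.mem_cons_self
  have hchar : ∀ x ∈ s :: rest, (f' x = f' s ↔ pvReach (s :: rest) s x) := by
    intro x hx
    rw [pvFinal_iff hInv' hcov' hx hs, pvReach_iff_adjConn hs]
    exact ⟨fun h => Relation.EqvGen.symm _ _ h, fun h => Relation.EqvGen.symm _ _ h⟩
  rw [show pvSingleComponent (s :: rest)
      = (match ((s :: rest).foldl (fun L c => (pvNbrs2 c).foldl (fun L n => pvMerge L c n) L)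
            ((s :: rest).foldl (fun d c => d.insert c c) PySem.Dict.empty)).values with
        | [] => false
        | v :: vs => (v :: vs).all (fun w => w == v)) from rfl]
  rw [pvItemsEq_values hL']
  simp only [List.map_cons, List.all_cons, List.all_eq_true, Bool.and_eq_true, beq_iff_eq,
    beq_self_eq_true, true_and, List.mem_map, forall_exists_index, and_imp]
  constructor
  · intro h x hx
    rcases List.mem_cons.1 hx with rfl | hx'
    · exact pvReach.base
    · exact (hchar x hx).1 (h (f' x) x hx' rfl)
  · intro h v x hx rfl
    exact (hchar x (List.mem_cons_of_mem _ hx)).2 (h x (List.mem_cons_of_mem _ hx))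

-- A's DFS loop: invariant-based characterization of the final visited set
theorem pvDfsA_spec (R : PySem.Set (Int × Int)) (s : Int × Int) :
    ∀ (stack : List (Int × Int)) (visited : PySem.Set (Int × Int))
      (hst : ∀ x ∈ stack, x ∈ R),
      visited.Nodup → (∀ x ∈ visited, x ∈ R) →
      (∀ x ∈ visited, pvReach R s x) → (∀ x ∈ stack, pvReach R s x) →
      (∀ x ∈ visited, ∀ y ∈ R, pvAdj x y → y ∈ visited ∨ y ∈ stack) →
      (s ∈ visited ∨ s ∈ stack) →
      ((pvDfsA R stack visited hst).Nodup ∧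
       (∀ x ∈ pvDfsA R stack visited hst, x ∈ R) ∧
       (∀ x ∈ pvDfsA R stack visited hst, pvReach R s x) ∧
       (∀ x ∈ pvDfsA R stack visited hst, ∀ y ∈ R, pvAdj x y → y ∈ pvDfsA R stack visited hst) ∧
       s ∈ pvDfsA R stack visited hst) := by
  intro stack visited hst
  induction stack, visited, hst using pvDfsA.induct with
  | case1 visited hst _ =>
    intro hnd hsub hreach _ hclosed hstart
    rw [pvDfsA.eq_def]
    refine ⟨hnd, hsub, hreach, ?_, ?_⟩
    · intro x hx y hy hadj
      rcases hclosed x hx y hy hadj with h | h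
      · exact h
      · cases h
    · rcases hstart with h | h
      · exact h
      · cases h
  | case2 visited cell rest hst hv _ ih =>
    intro hnd hsub hreach hstreach hclosed hstart
    rw [pvDfsA.eq_def]
    simp only [dif_pos hv]
    have hcv : cell ∈ visited := (PySem.Set.contains_iff _ _).1 hv
    apply ih hnd hsub hreach
    · intro x hx; exact hstreach x (List.mem_cons_of_mem _ hx)
    · intro x hx y hy hadj
      rcases hclosed x hx y hy hadj with h | h
      · exact Or.inl h
      · rcases List.mem_cons.1 h with rfl | h'
        · exact Or.inl hcv
        · exact Or.inr h'
    · rcases hstart with h | h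
      · exact Or.inl h
      · rcases List.mem_cons.1 h with rfl | h'
        · exact Or.inl hcv
        · exact Or.inr h'
  | case3 visited cell rest hst hv visited2 pushes2 _ ih =>
    intro hnd hsub hreach hstreach hclosed hstart
    simp only [visited2, pushes2] at ih
    rw [pvDfsA.eq_def]
    simp only [dif_neg hv]
    have hcellR : cell ∈ R := hst cell List.mem_cons_self
    have hcellnv : cell ∉ visited := fun h => hv ((PySem.Set.contains_iff _ _).2 h)
    have hvis' : PySem.Set.add visited cell = visited ++ [cell] :=
      PySem.Set.add_of_not_mem hcellnv
    have hmemv' : ∀ x, x ∈ PySem.Set.add visited cell ↔ (x ∈ visited ∨ x = cell) := by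
      intro x; rw [hvis']; simp
    have hpush : ∀ x, x ∈ List.filter
        (fun n => PySem.Set.contains R n && !PySem.Set.contains (PySem.Set.add visited cell) n)
        (List.map (fun d => (cell.1 + d.1, cell.2 + d.2)) pvDirections)
        ↔ (pvAdj cell x ∧ x ∈ R ∧ x ∉ PySem.Set.add visited cell) := by
      intro x
      rw [List.mem_filter, pvMapDirs_eq]
      constructor
      · rintro ⟨h1, h2⟩
        simp only [Bool.and_eq_true, Bool.not_eq_true'] at h2
        refine ⟨h1, (PySem.Set.contains_iff _ _).1 h2.1, ?_⟩
        intro hmm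
        have := (PySem.Set.contains_iff _ _).2 hmm
        exact absurd (this.symm.trans h2.2) (by simp)
      · rintro ⟨h1, h2, h3⟩
        refine ⟨h1, ?_⟩
        simp only [Bool.and_eq_true, Bool.not_eq_true']
        refine ⟨(PySem.Set.contains_iff _ _).2 h2, ?_⟩
        cases hmm : PySem.Set.contains (PySem.Set.add visited cell) x with
        | true => exact absurd ((PySem.Set.contains_iff _ _).1 hmm) h3
        | false => rfl
    apply ih
    · rw [hvis', List.nodup_append]
      refine ⟨hnd, List.nodup_singleton cell, ?_⟩
      intro a ha b hb
      rw [List.mem_singleton] at hb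
      exact fun hab => hcellnv ((hab.trans hb) ▸ ha)
    · intro x hx
      rcases (hmemv' x).1 hx with h | hxc
      · exact hsub x h
      · exact hxc ▸ hcellR
    · intro x hx
      rcases (hmemv' x).1 hx with h | hxc
      · exact hreach x h
      · exact hxc ▸ hstreach cell List.mem_cons_self
    · intro x hx
      rcases List.mem_append.1 hx with h | h
      · obtain ⟨h1, h2, _⟩ := (hpush x).1 (List.mem_reverse.1 h)
        exact pvReach.step (hstreach cell List.mem_cons_self) h2 h1
      · exact hstreach x (List.mem_cons_of_mem _ h)
    · intro x hx y hy hadj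
      rcases (hmemv' x).1 hx with h | hxc
      · rcases hclosed x h y hy hadj with h' | h'
        · exact Or.inl ((hmemv' y).2 (Or.inl h'))
        · rcases List.mem_cons.1 h' with hyc | h''
          · exact Or.inl ((hmemv' y).2 (Or.inr hyc))
          · exact Or.inr (List.mem_append_right _ h'')
      · subst hxc
        by_cases hyv : y ∈ PySem.Set.add visited x
        · exact Or.inl hyv
        · refine Or.inr (List.mem_append_left _ (List.mem_reverse.2 ?_))
          exact (hpush y).2 ⟨hadj, hy, hyv⟩
    · rcases hstart with h | h
      · exact Or.inl ((hmemv' s).2 (Or.inl h))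
      · rcases List.mem_cons.1 h with rfl | h'
        · exact Or.inl ((hmemv' s).2 (Or.inr rfl))
        · exact Or.inr (List.mem_append_right _ h')

theorem pv_length_eq_of_mem_iff {V W : List (Int × Int)} (hV : V.Nodup) (hW : W.Nodup)
    (h : ∀ x, x ∈ V ↔ x ∈ W) : V.length = W.length :=
  List.Perm.length_eq ((List.perm_ext_iff_of_nodup hV hW).2 h)

-- A's per-cell verdict: the DFS visits everything iff everything is reachable from the head
theorem pvCheckCell_spec (s : Int × Int) (rest : List (Int × Int))
    (hrem : (s :: rest).Nodup) :
    ((pvDfsA (s :: rest) [s] (PySem.Set.empty) (fun x hx => by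
        simp only [List.mem_singleton] at hx
        subst hx; exact List.mem_cons_self)).length == (s :: rest).length) = true
      ↔ (∀ x ∈ s :: rest, pvReach (s :: rest) s x) := by
  obtain ⟨hndA, hsubA, hreachA, hclosedA, hsA⟩ :=
    pvDfsA_spec (s :: rest) s [s] (PySem.Set.empty)
      (fun x hx => by
        simp only [List.mem_singleton] at hx
        subst hx; exact List.mem_cons_self)
      List.nodup_nil (by simp) (by simp)
      (fun x hx => by
        simp only [List.mem_singleton] at hx
        subst hx; exact pvReach.base)
      (by simp) (Or.inr List.mem_cons_self)
  rw [beq_iff_eq]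
  constructor
  · intro hlen x hx
    have hperm := (List.perm_ext_iff_of_nodup hndA hrem).1
      ((hndA.subperm hsubA).perm_of_length_le (le_of_eq hlen.symm))
    exact hreachA x ((hperm x).2 hx)
  · intro hall
    apply pv_length_eq_of_mem_iff hndA hrem
    intro x
    exact ⟨hsubA x, fun hx => pvClosed_reach hsA hclosedA x (hall x hx)⟩

-- the per-cell verdicts of A and B agree
theorem pvCheck_eq (island : List (Int × Int)) (cell : Int × Int) :
    pvCheckCell island cell
      = (!(PySem.Set.diff (PySem.Set.ofList island) [cell]).isEmpty
          && pvSingleComponent (PySem.Set.diff (PySem.Set.ofList island) [cell])) := by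
  unfold pvCheckCell
  rcases hrem : PySem.Set.diff (PySem.Set.ofList island) [cell] with _ | ⟨st, rest⟩
  · rfl
  · have hnd : (st :: rest).Nodup := by
      rw [← hrem]
      exact PySem.Set.nodup_diff _ _ (PySem.Set.nodup_ofList island)
    simp only [List.isEmpty_cons, Bool.not_false, Bool.true_and]
    rw [Bool.eq_iff_iff, pvCheckCell_spec st rest hnd, pvSingleComponent_spec st rest hnd]

theorem pvStartsContains_eq (starting_cells : List (Int × Int)) (cell : Int × Int) :
    PySem.Set.contains (PySem.Set.ofList starting_cells) cell = starting_cells.contains cell := by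
  rw [Bool.eq_iff_iff]
  constructor
  · intro hh
    exact List.contains_iff_mem.2 ((PySem.Set.mem_ofList _ _).1
      ((PySem.Set.contains_iff _ _).1 hh))
  · intro hh
    exact (PySem.Set.contains_iff _ _).2 ((PySem.Set.mem_ofList _ _).2
      (List.contains_iff_mem.1 hh))

-- A's inner per-island loop equals B's
theorem pvInner_eq (starting_cells island : List (Int × Int)) :
    ∀ (sub acc : List (Int × Int)),
      sub.foldl (fun moveable cell =>
        if starting_cells.contains cell then moveable
        else if pvCheckCell island cell then moveable ++ [cell] else moveable) acc
      = sub.foldl (fun moveable cell =>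
        if PySem.Set.contains (PySem.Set.ofList starting_cells) cell then moveable
        else
          let remaining := PySem.Set.diff (PySem.Set.ofList island) [cell]
          if !remaining.isEmpty && pvSingleComponent remaining then moveable ++ [cell]
          else moveable) acc := by
  intro sub
  induction sub with
  | nil => intro acc; rfl
  | cons c t ih =>
    intro acc
    simp only [List.foldl_cons]
    rw [pvStartsContains_eq, ← pvCheck_eq]
    exact ih _

theorem pvOuter_eq (starting_cells : List (Int × Int)) :
    ∀ (islands : List (List (Int × Int))) (acc : List (Int × Int)),
      islands.foldl (fun moveable island => island.foldl (fun moveable cell =>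
        if starting_cells.contains cell then moveable
        else if pvCheckCell island cell then moveable ++ [cell] else moveable) moveable) acc
      = islands.foldl (fun moveable island =>
          let cells := PySem.Set.ofList island
          island.foldl (fun moveable cell =>
            if PySem.Set.contains (PySem.Set.ofList starting_cells) cell then moveable
            else
              let remaining := PySem.Set.diff cells [cell]
              if !remaining.isEmpty && pvSingleComponent remaining then moveable ++ [cell]
              else moveable) moveable) acc := by
  intro islands
  induction islands with
  | nil => intro acc; rfl
  | cons i t ih =>
    intro acc
    simp only [List.foldl_cons]
    rw [pvInner_eq]
    exact ih _

-- ===== VERDICT (by name: the statement is the Claim_ definition above) =====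
theorem find_moveable_cells_spec : Claim_equal_find_moveable_cells := by
  intro islands starting_cells hdom
  clear hdom
  unfold Spec_find_moveable_cells find_moveable_cells find_moveable_cells_alt
  exact pvOuter_eq starting_cells islands []
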